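-- pv_equiv track=rewrite | github.com/hermanwu/algorithm-woo | Dict/Word/K-substring-with-k-different-characters/k-substring-with-k-different-characters.py | KSubstring
-- ===== SOURCE A (Python) =====
-- def KSubstring(stringIn, K):
--     char = ''
--     res = []
--
--     for i in stringIn:
--         if len(char) == K:
--             res.append(char)
--             char = char[1:]
--         if i in char:
--             idx = char.index(i)
--             char = char[idx+1:]
--         char += i
--     if len(char) == K:
--         res.append(char)
--     return len(set(res))
-- ===== SOURCE B (Python) =====
-- def KSubstring(stringIn, K):
--     # Brute force: enumerate every length-K window, keep those with K distinct
--     # characters, count the distinct windows.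
--     if K < 0:
--         return 0  # no substring has a negative number of distinct characters
--     seen = set()
--     for i in range(len(stringIn) - K + 1):
--         w = stringIn[i:i+K]
--         if len(set(w)) == K:
--             seen.add(w)
--     return len(seen)
-- ===== Notes on version B (the rewrite author's own statement) =====
-- stated objective: simpler
-- what changed: Replaces the incremental deduplicated-suffix sliding window (trim to K, cut at repeated character, append) by a direct scan that slices each length-K window, tests its distinctness independently with len(set(w)) == K, and counts the distinct good windows in a set.
import Mathlib
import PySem

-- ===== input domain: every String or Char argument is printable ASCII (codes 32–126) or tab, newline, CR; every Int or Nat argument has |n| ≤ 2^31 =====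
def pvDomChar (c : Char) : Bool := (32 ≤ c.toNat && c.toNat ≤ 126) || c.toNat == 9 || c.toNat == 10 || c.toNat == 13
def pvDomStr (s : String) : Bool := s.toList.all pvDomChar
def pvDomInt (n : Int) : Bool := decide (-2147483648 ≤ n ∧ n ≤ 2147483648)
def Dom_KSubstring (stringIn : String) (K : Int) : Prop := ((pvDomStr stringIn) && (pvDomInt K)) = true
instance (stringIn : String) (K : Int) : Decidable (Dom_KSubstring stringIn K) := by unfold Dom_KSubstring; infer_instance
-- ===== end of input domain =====

-- B replaces A's incremental deduplicated-suffix sliding window by a direct scan that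
-- tests each length-K window independently and counts the distinct good windows (simpler).


-- ===== PORT A =====
-- one loop iteration of A: trim the running window when it reached length K
-- (recording it), cut at a repeated character, append the current character
def KSubA_step (K : Int) (st : List Char × List (List Char)) (i : Char) :
    List Char × List (List Char) :=
  let st1 := if ((st.1.length : Int) = K) then (st.1.drop 1, st.2 ++ [st.1]) else st
  let ch1 := if i ∈ st1.1 then st1.1.drop (st1.1.idxOf i + 1) else st1.1
  (ch1 ++ [i], st1.2)

def KSubstring (stringIn : String) (K : Int) : Int :=
  let fin := stringIn.toList.foldl (KSubA_step K) ([], [])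
  let res := if ((fin.1.length : Int) = K) then fin.2 ++ [fin.1] else fin.2
  ((PySem.Set.ofList res).length : Int)

-- ===== PORT B =====
-- one loop iteration of B: slice the window starting at i, add it to the set when
-- it has K distinct characters
def KSubB_step (cs : List Char) (K : Int) (s : PySem.Set (List Char)) (i : Int) :
    PySem.Set (List Char) :=
  let w := PySem.List.slice cs (some i) (some (i + K))
  if (((PySem.Set.ofList w).length : Int) = K) then PySem.Set.add s w else s

def KSubstring_alt (stringIn : String) (K : Int) : Int :=
  if K < 0 then 0
  else
  let cs := stringIn.toList
  let seen := (PySem.List.pyRange 0 ((cs.length : Int) - K + 1) 1).foldl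
      (KSubB_step cs K) (PySem.Set.empty)
  ((seen.length : Int))

-- ===== PRECONDITION & SPEC =====
def Spec_KSubstring (stringIn : String) (K : Int) (out : Int) : Prop := out = KSubstring_alt stringIn K
instance (stringIn : String) (K : Int) (out : Int) : Decidable (Spec_KSubstring stringIn K out) := by unfold Spec_KSubstring; infer_instance

-- ===== CLAIM (what is proved, stated in full; the proofs are below) =====
def Claim_equal_KSubstring : Prop := ∀ (stringIn : String) (K : Int), Dom_KSubstring stringIn K → Spec_KSubstring stringIn K (KSubstring stringIn K)

-- ===== LEMMAS AND PROOFS =====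

-- window of length k (when k ≤ t ≤ |cs|) ending at position t
def KWin (cs : List Char) (k t : ℕ) : List Char := (cs.take t).drop (t - k)

-- the window recorded while processing position t, if any
def KWinG (cs : List Char) (k t : ℕ) : Option (List Char) :=
  if k ≤ t ∧ (KWin cs k t).Nodup then some (KWin cs k t) else none

-- invariant predicate: the running window could start at j (distinct suffix, length ≤ b)
def KP (p : List Char) (b j : ℕ) : Prop := (p.drop j).Nodup ∧ p.length ≤ b + j

-- the actual start of A's running window after processing p, with budget b
noncomputable def KJ (p : List Char) (b : ℕ) : ℕ := sInf {j | KP p b j}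

lemma KP_top (p : List Char) (b : ℕ) : KP p b p.length := ⟨by simp, by omega⟩

lemma KJ_spec (p : List Char) (b : ℕ) : KP p b (KJ p b) :=
  Nat.sInf_mem (s := {j | KP p b j}) ⟨p.length, KP_top p b⟩

lemma KJ_le (p : List Char) (b : ℕ) : KJ p b ≤ p.length :=
  Nat.sInf_le (KP_top p b)

lemma KJ_min {p : List Char} {b j : ℕ} (h : j < KJ p b) : ¬ KP p b j :=
  Nat.notMem_of_lt_sInf h

lemma KJ_eq {p : List Char} {b j : ℕ} (h : KP p b j)
    (hmin : ∀ j' < j, ¬ KP p b j') : KJ p b = j := by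
  refine le_antisymm (Nat.sInf_le h) ?_
  by_contra hlt
  exact hmin _ (by omega) (KJ_spec p b)

lemma KP_mono_j {p : List Char} {b j j' : ℕ} (hjj : j ≤ j') (h : KP p b j) : KP p b j' := by
  obtain ⟨h1, h2⟩ := h
  refine ⟨?_, by omega⟩
  have : p.drop j' = (p.drop j).drop (j' - j) := by
    rw [List.drop_drop]; congr 1; omega
  rw [this]
  exact h1.sublist (List.drop_sublist _ _)

lemma KP_mono_b {p : List Char} {b b' j : ℕ} (hbb : b ≤ b') (h : KP p b j) : KP p b' j := by
  obtain ⟨h1, h2⟩ := h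
  exact ⟨h1, by omega⟩

-- L3: the record condition
lemma KJ_full_iff (p : List Char) (k : ℕ) :
    p.length - KJ p k = k ↔ (k ≤ p.length ∧ (p.drop (p.length - k)).Nodup) := by
  have hle := KJ_le p k
  have hsp := KJ_spec p k
  constructor
  · intro h
    refine ⟨by omega, ?_⟩
    have he : p.length - k = KJ p k := by omega
    rw [he]; exact hsp.1
  · rintro ⟨hkl, hnd⟩
    have h1 : KJ p k ≤ p.length - k := Nat.sInf_le ⟨hnd, by omega⟩
    have h2 := hsp.2
    omega

-- L1: the trim step moves to budget k-1
lemma KJ_trim (p : List Char) (k : ℕ) (hk : 1 ≤ k) :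
    (if ((p.drop (KJ p k)).length : Int) = (k : Int)
      then (p.drop (KJ p k)).drop 1 else p.drop (KJ p k)) = p.drop (KJ p (k - 1)) := by
  obtain ⟨hnd, hlen⟩ := KJ_spec p k
  have hle := KJ_le p k
  have hcast : (((p.drop (KJ p k)).length : Int) = (k : Int)) ↔ p.length - KJ p k = k := by
    rw [List.length_drop, Nat.cast_inj]
  by_cases h : p.length - KJ p k = k
  · rw [if_pos (hcast.mpr h)]
    have hJ : KJ p (k - 1) = KJ p k + 1 := by
      apply KJ_eq
      · exact ⟨(KP_mono_j (Nat.le_succ _) ⟨hnd, hlen⟩).1, by omega⟩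
      · intro j' hj'
        rcases Nat.lt_succ_iff_lt_or_eq.mp hj' with h' | h'
        · exact fun hP => KJ_min h' (KP_mono_b (by omega) hP)
        · subst h'; rintro ⟨-, h2⟩; omega
    rw [hJ, List.drop_drop]
  · rw [if_neg (fun hc => h (hcast.mp hc))]
    have hJ : KJ p (k - 1) = KJ p k := by
      apply KJ_eq
      · exact ⟨hnd, by omega⟩
      · exact fun j' hj' hP => KJ_min hj' (KP_mono_b (by omega) hP)
    rw [hJ]

-- L2: the cut-and-append step restores budget k on p ++ [c]
lemma KJ_extend (p : List Char) (c : Char) (k : ℕ) (hk : 1 ≤ k) :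
    (if c ∈ p.drop (KJ p (k - 1))
      then (p.drop (KJ p (k - 1))).drop ((p.drop (KJ p (k - 1))).idxOf c + 1)
      else p.drop (KJ p (k - 1))) ++ [c]
    = (p ++ [c]).drop (KJ (p ++ [c]) k) := by
  obtain ⟨hnd, hlen⟩ := KJ_spec p (k - 1)
  have hle := KJ_le p (k - 1)
  by_cases hc : c ∈ p.drop (KJ p (k - 1))
  · rw [if_pos hc]
    have hm : (p.drop (KJ p (k - 1))).idxOf c < (p.drop (KJ p (k - 1))).length :=
      List.idxOf_lt_length_of_mem hc
    set J1 := KJ p (k - 1) with hJ1def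
    set m := (p.drop J1).idxOf c with hmdef
    have hml : (p.drop J1).length = p.length - J1 := List.length_drop
    have hJm : J1 + m < p.length := by omega
    have hgp : p[J1 + m]'hJm = c := by
      have h0 := List.getElem_idxOf hm
      rwa [List.getElem_drop] at h0
    have hdd : (p.drop J1).drop (m + 1) = p.drop (J1 + m + 1) := by
      rw [List.drop_drop, ← Nat.add_assoc]
    have hcnot : c ∉ (p.drop J1).drop (m + 1) := by
      intro hmem
      have hsplit := List.take_append_drop (m + 1) (p.drop J1)
      rw [← hsplit, List.nodup_append] at hnd
      obtain ⟨-, -, hdisj⟩ := hnd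
      have htk : c ∈ (p.drop J1).take (m + 1) := by
        have hg : ((p.drop J1).take (m + 1))[m]'(by simp only [List.length_take]; omega) = (p.drop J1)[m]'hm :=
          List.getElem_take
        have := List.getElem_mem (l := (p.drop J1).take (m + 1)) (n := m) (by simp only [List.length_take]; omega)
        rw [hg, List.getElem_idxOf hm] at this
        exact this
      exact hdisj c htk c hmem rfl
    have hKJ : KJ (p ++ [c]) k = J1 + m + 1 := by
      apply KJ_eq
      · constructor
        · rw [List.drop_append_of_le_length (by omega), List.nodup_append]
          refine ⟨?_, List.nodup_singleton c, ?_⟩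
          · rw [← hdd]; exact hnd.sublist (List.drop_sublist _ _)
          · intro a ha b hb
            simp only [List.mem_singleton] at hb
            subst hb
            intro h; subst h
            rw [← hdd] at ha
            exact hcnot ha
        · simp only [List.length_append, List.length_singleton]; omega
      · intro j' hj'
        rintro ⟨hnd', hlen'⟩
        rw [List.drop_append_of_le_length (by omega), List.nodup_append] at hnd'
        by_cases h1 : j' < J1
        · refine KJ_min h1 ⟨hnd'.1, ?_⟩
          simp only [List.length_append, List.length_singleton] at hlen'
          omega
        · obtain ⟨-, -, hdisj⟩ := hnd'
          have hcm : c ∈ p.drop j' := by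
            have hg : (p.drop j')[J1 + m - j']'(by rw [List.length_drop]; omega)
                = p[J1 + m]'hJm := by
              rw [List.getElem_drop]; congr 1; omega
            have hmem := List.getElem_mem (l := p.drop j') (n := J1 + m - j')
              (by rw [List.length_drop]; omega)
            rw [hg, hgp] at hmem
            exact hmem
          exact hdisj c hcm c (by simp) rfl
    rw [hKJ, List.drop_append_of_le_length (by omega), hdd]
  · rw [if_neg hc]
    have hKJ : KJ (p ++ [c]) k = KJ p (k - 1) := by
      apply KJ_eq
      · constructor
        · rw [List.drop_append_of_le_length hle, List.nodup_append]
          refine ⟨hnd, List.nodup_singleton c, ?_⟩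
          intro a ha b hb
          simp only [List.mem_singleton] at hb
          subst hb
          intro h; subst h
          exact hc ha
        · simp only [List.length_append, List.length_singleton]; omega
      · intro j' hj'
        rintro ⟨hnd', hlen'⟩
        rw [List.drop_append_of_le_length (by omega), List.nodup_append] at hnd'
        refine KJ_min hj' ⟨hnd'.1, ?_⟩
        simp only [List.length_append, List.length_singleton] at hlen'
        omega
    rw [hKJ, List.drop_append_of_le_length hle]

lemma KWinG_prefix (p q : List Char) (k : ℕ) :
    KWinG (p ++ q) k p.length
      = if k ≤ p.length ∧ (p.drop (p.length - k)).Nodup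
          then some (p.drop (p.length - k)) else none := by
  unfold KWinG KWin
  rw [List.take_append_of_le_length (le_refl p.length), List.take_length]

lemma KSubA_step_eq (K : Int) (k : ℕ) (hk : K = (k : Int)) (hk1 : 1 ≤ k)
    (p : List Char) (c : Char) (res : List (List Char)) :
    KSubA_step K (p.drop (KJ p k), res) c
      = ((p ++ [c]).drop (KJ (p ++ [c]) k),
         res ++ (KWinG (p ++ [c]) k p.length).toList) := by
  subst hk
  have hle := KJ_le p k
  have htrim := KJ_trim p k hk1
  have hext := KJ_extend p c k hk1
  have hnat : (((p.drop (KJ p k)).length : Int) = (k : Int)) ↔ p.length - KJ p k = k := by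
    rw [List.length_drop, Nat.cast_inj]
  rw [KWinG_prefix]
  by_cases hcond : ((p.drop (KJ p k)).length : Int) = (k : Int)
  · rw [if_pos hcond] at htrim
    have hfull : k ≤ p.length ∧ (p.drop (p.length - k)).Nodup :=
      (KJ_full_iff p k).mp (hnat.mp hcond)
    have hKJ : KJ p k = p.length - k := by
      have := hnat.mp hcond; omega
    simp only [KSubA_step, if_pos hcond, htrim, hext, if_pos hfull, Option.toList_some]
    rw [hKJ]
  · rw [if_neg hcond] at htrim
    have hfull : ¬ (k ≤ p.length ∧ (p.drop (p.length - k)).Nodup) := by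
      intro h
      exact hcond (hnat.mpr ((KJ_full_iff p k).mpr h))
    simp only [KSubA_step, if_neg hcond]
    rw [htrim, hext, if_neg hfull]
    simp

lemma KSubA_loop (K : Int) (k : ℕ) (hk : K = (k : Int)) (hk1 : 1 ≤ k) :
    ∀ (rest p : List Char) (res : List (List Char)),
      List.foldl (KSubA_step K) (p.drop (KJ p k), res) rest
        = ((p ++ rest).drop (KJ (p ++ rest) k),
           res ++ (List.range' p.length rest.length).filterMap (KWinG (p ++ rest) k)) := by
  intro rest
  induction rest with
  | nil => intro p res; simp
  | cons c rest' ih =>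
    intro p res
    rw [List.foldl_cons, KSubA_step_eq K k hk hk1 p c res,
      ih (p ++ [c]) (res ++ (KWinG (p ++ [c]) k p.length).toList)]
    have hassoc : (p ++ [c]) ++ rest' = p ++ (c :: rest') := by
      rw [List.append_assoc, List.singleton_append]
    rw [hassoc]
    have hlen : (p ++ [c]).length = p.length + 1 := by simp
    rw [hlen]
    have hrange : List.range' p.length (rest'.length + 1) = p.length :: List.range' (p.length + 1) rest'.length :=
      List.range'_succ
    rw [List.length_cons, hrange, List.filterMap_cons]
    have hG : KWinG (p ++ [c]) k p.length = KWinG (p ++ (c :: rest')) k p.length := by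
      rw [KWinG_prefix, KWinG_prefix]
    rw [hG]
    cases h : KWinG (p ++ (c :: rest')) k p.length with
    | none => simp
    | some w => simp

-- B's loop is "add each good window to the set"
lemma KSubB_foldl (cs : List Char) (K : Int) :
    ∀ (l : List Int) (s : PySem.Set (List Char)),
      l.foldl (KSubB_step cs K) s
        = ((l.filter (fun i =>
              decide (((PySem.Set.ofList (PySem.List.slice cs (some i) (some (i + K)))).length : Int) = K))).map
            (fun i => PySem.List.slice cs (some i) (some (i + K)))).foldl PySem.Set.add s := by
  intro l
  induction l with
  | nil => intro s; simp
  | cons a l' ih =>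
    intro s
    by_cases h : ((PySem.Set.ofList (PySem.List.slice cs (some a) (some (a + K)))).length : Int) = K
    · simp only [List.foldl_cons, List.filter_cons, decide_eq_true_eq, if_pos h, List.map_cons]
      rw [ih]
      simp [KSubB_step, h]
    · simp only [List.foldl_cons, List.filter_cons, decide_eq_true_eq, if_neg h]
      rw [ih]
      simp [KSubB_step, h]

-- |set(l)| is the cardinality of l's finset of elements
lemma lenOfList {α : Type} [BEq α] [LawfulBEq α] [DecidableEq α] (l : List α) :
    (PySem.Set.ofList l).length = l.toFinset.card := by
  have hnd : (PySem.Set.ofList l).Nodup := PySem.Set.nodup_ofList l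
  rw [← List.toFinset_card_of_nodup hnd]
  congr 1
  ext x
  simp [List.mem_toFinset, PySem.Set.mem_ofList]

lemma lenOfList_eq_of_mem_iff (l₁ l₂ : List (List Char))
    (h : ∀ x, x ∈ l₁ ↔ x ∈ l₂) :
    (PySem.Set.ofList l₁).length = (PySem.Set.ofList l₂).length := by
  rw [lenOfList, lenOfList]
  congr 1
  ext x
  simp only [List.mem_toFinset, h]

lemma slice_window (cs : List Char) (K : Int) (k : ℕ) (hk : K = (k : Int)) (i : Int)
    (hi : 0 ≤ i) :
    PySem.List.slice cs (some i) (some (i + K)) = (cs.drop i.toNat).take k := by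
  subst hk
  rw [PySem.List.slice_toNat cs hi (by omega)]
  congr 1
  omega

lemma good_cond (w : List Char) (k : ℕ) (hw : w.length = k) :
    (PySem.Set.ofList w).length = k ↔ w.Nodup := by
  rw [lenOfList, List.card_toFinset]
  constructor
  · intro h
    exact List.dedup_eq_self.mp ((List.dedup_sublist w).eq_of_length (by rw [h, hw]))
  · intro h
    rw [List.dedup_eq_self.mpr h, hw]

-- membership equivalence of the two window lists (K = k ≥ 1)
lemma mem_windows_iff (cs : List Char) (K : Int) (k : ℕ) (hk : K = (k : Int)) (hk1 : 1 ≤ k)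
    (x : List Char) :
    x ∈ (List.range' 0 (cs.length + 1)).filterMap (KWinG cs k)
      ↔ x ∈ ((PySem.List.pyRange 0 ((cs.length : Int) - K + 1) 1).filter (fun i =>
              decide (((PySem.Set.ofList (PySem.List.slice cs (some i) (some (i + K)))).length : Int) = K))).map
            (fun i => PySem.List.slice cs (some i) (some (i + K))) := by
  rw [List.mem_filterMap, List.mem_map]
  constructor
  · rintro ⟨t, htmem, hsome⟩
    rw [List.mem_range'_1] at htmem
    unfold KWinG at hsome
    split_ifs at hsome with hcnd
    · obtain ⟨hkt, hndw⟩ := hcnd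
      have hx : KWin cs k t = x := by injection hsome
      have ht : t ≤ cs.length := by omega
      have hwin : (cs.drop (t - k)).take k = KWin cs k t := by
        unfold KWin
        rw [List.drop_take]
        congr 1
        omega
      have hlenw : (KWin cs k t).length = k := by
        unfold KWin
        rw [List.length_drop, List.length_take]
        omega
      have hslice : PySem.List.slice cs (some ((t - k : ℕ) : Int))
          (some (((t - k : ℕ) : Int) + K)) = KWin cs k t := by
        rw [slice_window cs K k hk _ (Int.natCast_nonneg _), Int.toNat_natCast, hwin]
      refine ⟨((t - k : ℕ) : Int), ?_, by rw [hslice, hx]⟩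
      rw [List.mem_filter]
      refine ⟨?_, ?_⟩
      · rw [PySem.List.mem_pyRange_one]
        refine ⟨Int.natCast_nonneg _, by subst hk; omega⟩
      · rw [decide_eq_true_eq, hslice, hk, Nat.cast_inj]
        exact (good_cond _ k hlenw).mpr hndw
  · rintro ⟨i, hifm, hfx⟩
    rw [List.mem_filter] at hifm
    obtain ⟨hirange, hcond⟩ := hifm
    rw [PySem.List.mem_pyRange_one] at hirange
    obtain ⟨hi0, hilt⟩ := hirange
    rw [decide_eq_true_eq] at hcond
    have hia : (i.toNat : Int) = i := Int.toNat_of_nonneg hi0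
    have hak : i.toNat + k ≤ cs.length := by subst hk; omega
    have hslice : PySem.List.slice cs (some i) (some (i + K)) = (cs.drop i.toNat).take k :=
      slice_window cs K k hk i hi0
    have hwin : KWin cs k (i.toNat + k) = (cs.drop i.toNat).take k := by
      have ht' : i.toNat + k - k = i.toNat := by omega
      unfold KWin
      rw [ht', List.drop_take, Nat.add_sub_cancel_left]
    have hlenw : ((cs.drop i.toNat).take k).length = k := by
      rw [List.length_take, List.length_drop]
      omega
    have hnd : ((cs.drop i.toNat).take k).Nodup := by
      rw [hslice, hk, Nat.cast_inj] at hcond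
      exact (good_cond _ k hlenw).mp hcond
    refine ⟨i.toNat + k, ?_, ?_⟩
    · rw [List.mem_range'_1]
      omega
    · unfold KWinG
      rw [if_pos ⟨by omega, by rw [hwin]; exact hnd⟩, hwin, ← hslice, hfx]

-- loop facts for the degenerate cases K < 0 and K = 0
lemma A_res_neg (K : Int) (hK : K < 0) :
    ∀ (l : List Char) (ch : List Char) (res : List (List Char)),
      (List.foldl (KSubA_step K) (ch, res) l).2 = res := by
  intro l
  induction l with
  | nil => intro ch res; rfl
  | cons c l' ih =>
    intro ch res
    rw [List.foldl_cons]
    have hcond : ¬ ((ch.length : Int) = K) := by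
      have h0 : (0 : Int) ≤ (ch.length : Int) := Int.natCast_nonneg _
      omega
    simp only [KSubA_step, if_neg hcond]
    exact ih _ _

lemma A_res_zero :
    ∀ (l : List Char) (ch : List Char) (res : List (List Char)), ch ≠ [] →
      (List.foldl (KSubA_step 0) (ch, res) l).2 = res ∧
      (List.foldl (KSubA_step 0) (ch, res) l).1 ≠ [] := by
  intro l
  induction l with
  | nil => intro ch res h; exact ⟨rfl, h⟩
  | cons c l' ih =>
    intro ch res h
    rw [List.foldl_cons]
    have hcond : ¬ ((ch.length : Int) = (0 : Int)) := by
      intro hc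
      have h0 : ch.length = 0 := by exact_mod_cast hc
      exact h (List.eq_nil_of_length_eq_zero h0)
    simp only [KSubA_step, if_neg hcond]
    exact ih _ _ (by simp)

-- B as a set of windows, any K
lemma B_eq_windows (s : String) (K : Int) (hK : 0 ≤ K) :
    KSubstring_alt s K
      = ((PySem.Set.ofList
            (((PySem.List.pyRange 0 ((s.toList.length : Int) - K + 1) 1).filter (fun i =>
                decide (((PySem.Set.ofList (PySem.List.slice s.toList (some i) (some (i + K)))).length : Int) = K))).map
              (fun i => PySem.List.slice s.toList (some i) (some (i + K))))).length : Int) := by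
  simp only [KSubstring_alt]
  rw [if_neg (not_lt.mpr hK)]
  rw [KSubB_foldl]
  have hemp : (PySem.Set.empty : PySem.Set (List Char)) = [] := rfl
  rw [hemp, ← PySem.Set.ofList_eq_foldl]

-- A as the ordered list of all good windows, for K = k ≥ 1
lemma A_eq_windows (s : String) (K : Int) (k : ℕ) (hk : K = (k : Int)) (hk1 : 1 ≤ k) :
    KSubstring s K
      = ((PySem.Set.ofList
            ((List.range' 0 (s.toList.length + 1)).filterMap (KWinG s.toList k))).length : Int) := by
  have hloop := KSubA_loop K k hk hk1 s.toList [] []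
  rw [List.drop_nil, List.nil_append, List.nil_append] at hloop
  simp only [List.length_nil] at hloop
  simp only [KSubstring]
  rw [hloop]
  congr 2
  have hcast : ((((s.toList.drop (KJ s.toList k)).length : ℕ) : Int) = K)
      ↔ s.toList.length - KJ s.toList k = k := by
    rw [hk, List.length_drop, Nat.cast_inj]
  have hgN : (List.range' 0 (s.toList.length + 1)).filterMap (KWinG s.toList k)
      = (List.range' 0 s.toList.length).filterMap (KWinG s.toList k)
        ++ (KWinG s.toList k s.toList.length).toList := by
    rw [List.range'_concat, List.filterMap_append]
    have h01 : 0 + 1 * s.toList.length = s.toList.length := by omega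
    rw [h01]
    congr 1
  rw [hgN]
  have hG : KWinG s.toList k s.toList.length
      = if k ≤ s.toList.length ∧ (s.toList.drop (s.toList.length - k)).Nodup
          then some (s.toList.drop (s.toList.length - k)) else none := by
    unfold KWinG KWin
    rw [List.take_length]
  by_cases hcond : s.toList.length - KJ s.toList k = k
  · rw [if_pos (hcast.mpr hcond)]
    obtain ⟨hkn, hnd⟩ := (KJ_full_iff s.toList k).mp hcond
    have hKJc : KJ s.toList k = s.toList.length - k := by
      have := KJ_le s.toList k
      omega
    rw [hG, if_pos ⟨hkn, hnd⟩, Option.toList_some, hKJc]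
  · rw [if_neg (fun hc => hcond (hcast.mp hc))]
    rw [hG, if_neg (fun hc => hcond ((KJ_full_iff s.toList k).mpr hc)), Option.toList_none,
      List.append_nil]

lemma main_pos (s : String) (K : Int) (hK : 0 < K) : KSubstring s K = KSubstring_alt s K := by
  have hk : K = (K.toNat : Int) := (Int.toNat_of_nonneg (le_of_lt hK)).symm
  have hk1 : 1 ≤ K.toNat := by omega
  rw [A_eq_windows s K K.toNat hk hk1, B_eq_windows s K (le_of_lt hK)]
  exact congrArg _ (lenOfList_eq_of_mem_iff _ _ (mem_windows_iff s.toList K K.toNat hk hk1))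

lemma main_neg (s : String) (K : Int) (hK : K < 0) : KSubstring s K = KSubstring_alt s K := by
  have hA2 : (List.foldl (KSubA_step K) ([], []) s.toList).2 = [] := A_res_neg K hK _ _ _
  have hfin : ¬ (((List.foldl (KSubA_step K) ([], []) s.toList).1.length : Int) = K) := by
    have h0 : (0 : Int) ≤ ((List.foldl (KSubA_step K) ([], []) s.toList).1.length : Int) :=
      Int.natCast_nonneg _
    omega
  simp only [KSubstring, KSubstring_alt]
  rw [if_neg hfin, hA2, if_pos hK]
  rfl

lemma main_zero (s : String) : KSubstring s 0 = KSubstring_alt s 0 := by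
  have hB : KSubstring_alt s 0 = 1 := by
    simp only [KSubstring_alt]
    rw [if_neg (by omega : ¬ ((0:Int) < 0))]
    have hall : ∀ i ∈ PySem.List.pyRange 0 ((s.toList.length : Int) - 0 + 1) 1,
        PySem.List.slice s.toList (some i) (some (i + 0)) = [] := by
      intro i hi
      obtain ⟨hi0, -⟩ := PySem.List.mem_pyRange_one.mp hi
      rw [add_zero, PySem.List.slice_toNat s.toList hi0 hi0]
      simp
    have hfoldeq : ∀ (l : List Int) (st : PySem.Set (List Char)),
        (∀ i ∈ l, PySem.List.slice s.toList (some i) (some (i + 0)) = []) →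
        l.foldl (KSubB_step s.toList 0) st = l.foldl (fun acc _ => PySem.Set.add acc []) st := by
      intro l
      induction l with
      | nil => intro st h; rfl
      | cons a l' ih =>
        intro st h
        rw [List.foldl_cons, List.foldl_cons]
        have ha := h a (List.mem_cons_self)
        have hstep : KSubB_step s.toList 0 st a = PySem.Set.add st [] := by
          simp only [KSubB_step, ha]
          rw [if_pos]
          simp [PySem.Set.ofList]
        rw [hstep]
        exact ih _ (fun i hi => h i (List.mem_cons_of_mem _ hi))
    rw [hfoldeq _ _ hall]
    have hre : ∀ (l : List Int), l ≠ [] →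
        l.foldl (fun (acc : PySem.Set (List Char)) _ => PySem.Set.add acc []) PySem.Set.empty
          = [[]] := by
      intro l hl
      cases l with
      | nil => exact absurd rfl hl
      | cons a l' =>
        rw [List.foldl_cons]
        have h1 : PySem.Set.add PySem.Set.empty ([] : List Char) = [[]] := rfl
        rw [h1]
        have : ∀ (m : List Int) (st : PySem.Set (List Char)), ([] : List Char) ∈ st →
            m.foldl (fun acc _ => PySem.Set.add acc []) st = st := by
          intro m
          induction m with
          | nil => intro st h; rfl
          | cons b m' ih =>
            intro st h
            rw [List.foldl_cons, PySem.Set.add_of_mem h]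
            exact ih st h
        rw [this l' [[]] (by simp)]
    rw [hre]
    · rfl
    · intro hnil
      have := congrArg List.length hnil
      rw [PySem.List.length_pyRange_one] at this
      simp at this
  rw [hB]
  cases hcs : s.toList with
  | nil =>
    simp only [KSubstring, hcs]
    rfl
  | cons c l =>
    simp only [KSubstring, hcs]
    rw [List.foldl_cons]
    have hstep : KSubA_step 0 ([], []) c = ([c], [[]]) := by
      simp [KSubA_step]
    rw [hstep]
    obtain ⟨h2, h1⟩ := A_res_zero l [c] [[]] (by simp)
    have hcond : ¬ (((List.foldl (KSubA_step 0) ([c], [[]]) l).1.length : Int) = (0 : Int)) := by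
      intro hc
      have h0 : (List.foldl (KSubA_step 0) ([c], [[]]) l).1.length = 0 := by exact_mod_cast hc
      exact h1 (List.eq_nil_of_length_eq_zero h0)
    rw [if_neg hcond, h2]
    rfl

-- ===== VERDICT (by name: the statement is the Claim_ definition above) =====
theorem KSubstring_spec : Claim_equal_KSubstring := by
  intro s K _
  unfold Spec_KSubstring
  rcases lt_trichotomy K 0 with hK | hK | hK
  · exact main_neg s K hK
  · subst hK; exact main_zero s
  · exact main_pos s K hK
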